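-- pv_equiv track=rewrite | github.com/sonofeft/RocketCEA | rocketcea/blends.py | turnCardsIntoTokenL
-- ===== SOURCE A (Python) =====
-- def turnCardsIntoTokenL( cardL ):
--     """turn the card list into one long list of tokens"""
--     tokenL = []
--     for card in cardL:
--         c = card.replace('=',' ')
--         spL = c.split()
--         for s in spL:
--             if s:
--                 tokenL.append(s)
--     return tokenL
-- ===== SOURCE B (Python) =====
-- def turnCardsIntoTokenL( cardL ):
--     """turn the card list into one long list of tokens"""
--     tokenL = []
--     for card in cardL:
--         cur = []
--         for ch in card:
--             if ch == '=' or ch.isspace():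
--                 if cur:
--                     tokenL.append(''.join(cur))
--                     cur = []
--             else:
--                 cur.append(ch)
--         if cur:
--             tokenL.append(''.join(cur))
--     return tokenL
-- ===== Notes on version B (the rewrite author's own statement) =====
-- stated objective: alternative
-- what changed: B replaces A's per-card replace('=',' ')+split() library tokenization with an explicit character-level state machine that scans each character once, accumulating the current token and emitting it at '='/whitespace boundaries.
import Mathlib
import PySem

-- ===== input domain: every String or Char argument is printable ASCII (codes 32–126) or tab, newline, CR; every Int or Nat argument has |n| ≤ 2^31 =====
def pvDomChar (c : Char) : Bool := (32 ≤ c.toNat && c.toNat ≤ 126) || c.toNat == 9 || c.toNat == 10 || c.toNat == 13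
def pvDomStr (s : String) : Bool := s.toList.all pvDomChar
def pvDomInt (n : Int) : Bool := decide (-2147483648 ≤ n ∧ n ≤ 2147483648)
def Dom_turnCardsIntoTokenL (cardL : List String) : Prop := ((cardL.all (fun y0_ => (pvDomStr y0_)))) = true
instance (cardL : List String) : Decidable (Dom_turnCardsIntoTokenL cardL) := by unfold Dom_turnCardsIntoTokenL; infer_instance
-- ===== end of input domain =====

-- B replaces A's per-card replace+split tokenization with an explicit character-level
-- state machine (scan each char, emit the accumulated token at '='/whitespace boundaries);
-- objective: alternative (same cost, different mechanism).

-- ===== PORT A =====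
def turnCardsIntoTokenL (cardL : List String) : List String :=
  cardL.foldl (fun tokenL card =>
    let c := PySem.Str.replace card "=" " "
    let spL := PySem.Str.split₀ c
    spL.foldl (fun tl s => if s = "" then tl else tl ++ [s]) tokenL) []

-- ===== PORT B =====
def turnCardsIntoTokenL_alt (cardL : List String) : List String :=
  cardL.foldl (fun tokenL card =>
    let p := card.toList.foldl (fun (p : List String × List Char) ch =>
      if ch = '=' || PySem.Chars.isspace ch then
        if p.2.isEmpty then (p.1, []) else (p.1 ++ [String.ofList p.2], [])
      else (p.1, p.2 ++ [ch])) (tokenL, [])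
    if p.2.isEmpty then p.1 else p.1 ++ [String.ofList p.2]) []

-- ===== PRECONDITION & SPEC =====
def Spec_turnCardsIntoTokenL (cardL : List String) (out : List String) : Prop := out = turnCardsIntoTokenL_alt cardL
instance (cardL : List String) (out : List String) : Decidable (Spec_turnCardsIntoTokenL cardL out) := by unfold Spec_turnCardsIntoTokenL; infer_instance

-- ===== CLAIM (what is proved, stated in full; the proofs are below) =====
def Claim_equal_turnCardsIntoTokenL : Prop := ∀ (cardL : List String), Dom_turnCardsIntoTokenL cardL → Spec_turnCardsIntoTokenL cardL (turnCardsIntoTokenL cardL)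

-- ===== LEMMAS AND PROOFS =====

-- replacing the single char '=' by ' ' is mapping a char function
theorem pv_replace_go_single (l acc : List Char) :
    PySem.Chars.replace.go ['='] [' '] l.length l acc =
      acc.reverse ++ l.map (fun c => if c = '=' then ' ' else c) := by
  induction l generalizing acc with
  | nil => simp [PySem.Chars.replace.go]
  | cons c t ih =>
    simp only [List.length_cons, PySem.Chars.replace.go, List.map_cons]
    by_cases h : c = '='
    · subst h; simp [List.isPrefixOf, ih]
    · simp [List.isPrefixOf, Ne.symm h, h, ih]

theorem pv_replace_single (l : List Char) :
    PySem.Chars.replace l ['='] [' '] = l.map (fun c => if c = '=' then ' ' else c) := by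
  simpa [PySem.Chars.replace] using pv_replace_go_single l []

-- accumulator generalization for split₀.go
theorem pv_split_go_acc (l : List Char) (cur : List Char) (acc : List (List Char)) :
    PySem.Chars.split₀.go l cur acc = acc.reverse ++ PySem.Chars.split₀.go l cur [] := by
  induction l generalizing cur acc with
  | nil =>
    by_cases h : cur.isEmpty
    · simp [PySem.Chars.split₀.go, h]
    · simp [PySem.Chars.split₀.go, h]
  | cons c t ih =>
    by_cases hs : PySem.Chars.isspace c
    · by_cases h : cur.isEmpty
      · simp only [PySem.Chars.split₀.go, hs, h, if_true]
        exact ih [] acc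
      · simp only [PySem.Chars.split₀.go, hs, h, Bool.false_eq_true, if_false, if_true]
        rw [ih [] (cur.reverse :: acc), ih [] [cur.reverse]]
        simp
    · simp only [PySem.Chars.split₀.go, hs, Bool.false_eq_true, if_false]
      exact ih _ _

-- split₀ never produces an empty token
theorem pv_split_go_ne_nil (l : List Char) (cur : List Char) (acc : List (List Char))
    (hacc : ∀ x ∈ acc, x ≠ []) : ∀ x ∈ PySem.Chars.split₀.go l cur acc, x ≠ [] := by
  induction l generalizing cur acc with
  | nil =>
    intro x hx
    by_cases h : cur.isEmpty
    · simp only [PySem.Chars.split₀.go, h, if_true, List.mem_reverse] at hx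
      exact hacc x hx
    · simp only [PySem.Chars.split₀.go, h, Bool.false_eq_true, if_false, List.mem_reverse,
        List.mem_cons] at hx
      rcases hx with hx | hx
      · subst hx; simpa [List.isEmpty_iff] using h
      · exact hacc x hx
  | cons c t ih =>
    intro x hx
    by_cases hs : PySem.Chars.isspace c
    · by_cases h : cur.isEmpty
      · simp only [PySem.Chars.split₀.go, hs, h, if_true] at hx
        exact ih [] acc hacc x hx
      · simp only [PySem.Chars.split₀.go, hs, h, if_true, Bool.false_eq_true, if_false] at hx
        refine ih [] (cur.reverse :: acc) ?_ x hx
        intro y hy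
        rcases List.mem_cons.mp hy with hy | hy
        · subst hy; simpa [List.isEmpty_iff] using h
        · exact hacc y hy
    · simp only [PySem.Chars.split₀.go, hs, Bool.false_eq_true, if_false] at hx
      exact ih (c :: cur) acc hacc x hx

theorem pv_split₀_ne_nil (l : List Char) : ∀ x ∈ PySem.Chars.split₀ l, x ≠ [] :=
  pv_split_go_ne_nil l [] [] (by simp)

theorem pv_split₀_str_ne_nil (c : String) : ∀ s ∈ PySem.Str.split₀ c, s ≠ "" := by
  intro s hs
  simp only [PySem.Str.split₀, List.mem_map] at hs
  obtain ⟨x, hx, rfl⟩ := hs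
  have := pv_split₀_ne_nil c.toList x hx
  intro hcon
  apply this
  have : (String.ofList x).toList = ("" : String).toList := by rw [hcon]
  simpa using this

-- the inner Python loop of A appends every (necessarily nonempty) token
theorem pv_inner_fold (spL : List String) (tl : List String) (h : ∀ s ∈ spL, s ≠ "") :
    spL.foldl (fun tl s => if s = "" then tl else tl ++ [s]) tl = tl ++ spL := by
  induction spL generalizing tl with
  | nil => simp
  | cons s t ih =>
    have hs : s ≠ "" := h s (by simp)
    simp only [List.foldl_cons, hs, if_false]
    rw [ih _ (fun x hx => h x (by simp [hx]))]
    simp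

-- A's outer loop accumulates the per-card splits
theorem pv_outer_fold (cardL : List String) (tl : List String) :
    cardL.foldl (fun tokenL card =>
      (PySem.Str.split₀ (PySem.Str.replace card "=" " ")).foldl
        (fun tl s => if s = "" then tl else tl ++ [s]) tokenL) tl =
    tl ++ cardL.flatMap (fun card => PySem.Str.split₀ (PySem.Str.replace card "=" " ")) := by
  induction cardL generalizing tl with
  | nil => simp
  | cons card t ih =>
    simp only [List.foldl_cons, List.flatMap_cons]
    rw [pv_inner_fold _ _ (pv_split₀_str_ne_nil _), ih]
    simp

-- B's character automaton over l equals split₀ of l with '=' mapped to ' '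
theorem pv_auto (l : List Char) (tl : List String) (cur : List Char) :
    (let p := l.foldl (fun (p : List String × List Char) ch =>
        if ch = '=' || PySem.Chars.isspace ch then
          if p.2.isEmpty then (p.1, []) else (p.1 ++ [String.ofList p.2], [])
        else (p.1, p.2 ++ [ch])) (tl, cur)
     if p.2.isEmpty then p.1 else p.1 ++ [String.ofList p.2]) =
    tl ++ (PySem.Chars.split₀.go (l.map (fun c => if c = '=' then ' ' else c))
        cur.reverse []).map String.ofList := by
  induction l generalizing tl cur with
  | nil =>
    by_cases h : cur.isEmpty
    · simp [PySem.Chars.split₀.go, h]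
    · simp [PySem.Chars.split₀.go, h]
  | cons c t ih =>
    have hsp : PySem.Chars.isspace ' ' = true := by decide
    by_cases hsep : (c = '=' || PySem.Chars.isspace c) = true
    · have hrs : PySem.Chars.isspace (if c = '=' then ' ' else c) = true := by
        by_cases hc : c = '='
        · simp [hc, hsp]
        · simp [hc] at hsep ⊢; simpa using hsep
      by_cases h : cur.isEmpty
      · have hcur : cur = [] := List.isEmpty_iff.mp h
        subst hcur
        simp only [List.foldl_cons, hsep, if_true, List.isEmpty_nil, List.map_cons]
        rw [ih tl []]
        simp [PySem.Chars.split₀.go, hrs]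
      · simp only [List.foldl_cons, hsep, if_true, h, Bool.false_eq_true, if_false,
          List.map_cons]
        rw [ih (tl ++ [String.ofList cur]) []]
        have hne : cur.reverse.isEmpty = false := by
          simpa using h
        simp only [PySem.Chars.split₀.go, hrs, hne, Bool.false_eq_true, if_false, if_true,
          List.reverse_reverse]
        rw [pv_split_go_acc _ [] [cur]]
        simp
    · have hc : c ≠ '=' := by
        intro hcon; subst hcon; simp at hsep
      have hns : PySem.Chars.isspace c = false := by
        cases hx : PySem.Chars.isspace c
        · rfl
        · exfalso; exact hsep (by simp [hx])
      simp only [List.foldl_cons, hsep, Bool.false_eq_true, if_false, List.map_cons]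
      rw [ih tl (cur ++ [c])]
      simp [PySem.Chars.split₀.go, hc, hns]

-- B's outer loop also accumulates the per-card splits
theorem pv_alt_outer (cardL : List String) (tl : List String) :
    cardL.foldl (fun tokenL card =>
      let p := card.toList.foldl (fun (p : List String × List Char) ch =>
        if ch = '=' || PySem.Chars.isspace ch then
          if p.2.isEmpty then (p.1, []) else (p.1 ++ [String.ofList p.2], [])
        else (p.1, p.2 ++ [ch])) (tokenL, [])
      if p.2.isEmpty then p.1 else p.1 ++ [String.ofList p.2]) tl =
    tl ++ cardL.flatMap (fun card => PySem.Str.split₀ (PySem.Str.replace card "=" " ")) := by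
  induction cardL generalizing tl with
  | nil => simp
  | cons card t ih =>
    simp only [List.foldl_cons, List.flatMap_cons]
    have hcard : (let p := card.toList.foldl (fun (p : List String × List Char) ch =>
        if ch = '=' || PySem.Chars.isspace ch then
          if p.2.isEmpty then (p.1, []) else (p.1 ++ [String.ofList p.2], [])
        else (p.1, p.2 ++ [ch])) (tl, [])
      if p.2.isEmpty then p.1 else p.1 ++ [String.ofList p.2]) =
        tl ++ PySem.Str.split₀ (PySem.Str.replace card "=" " ") := by
      rw [pv_auto card.toList tl []]
      simp [PySem.Str.split₀, PySem.Str.toList_replace, pv_replace_single,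
        PySem.Chars.split₀]
    rw [hcard, ih]
    simp

-- ===== VERDICT (by name: the statement is the Claim_ definition above) =====
theorem turnCardsIntoTokenL_spec : Claim_equal_turnCardsIntoTokenL := by
  intro cardL _
  show turnCardsIntoTokenL cardL = turnCardsIntoTokenL_alt cardL
  have hA := pv_outer_fold cardL []
  have hB := pv_alt_outer cardL []
  simp only [List.nil_append] at hA hB
  simpa [turnCardsIntoTokenL, turnCardsIntoTokenL_alt] using hA.trans hB.symm
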